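-- pv_equiv track=rewrite | github.com/CompilerFans/npp | status/app_usage_status/analyze_opencv_coverage.py | categorize_apis
-- ===== SOURCE A (Python) =====
-- from collections import defaultdict
--
-- def categorize_apis(apis):
--     """Categorize APIs by function group"""
--     categories = defaultdict(list)
--
--     for api in apis:
--         # Remove _Ctx suffix for categorization
--         base = api.replace('_Ctx', '')
--
--         # Extract category from function name
--         if 'Histogram' in base:
--             cat = 'Histogram'
--         elif 'Filter' in base or 'Erode' in base or 'Dilate' in base:
--             cat = 'Filtering'
--         elif 'Warp' in base or 'Resize' in base or 'Remap' in base or 'Rotate' in base: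
--             cat = 'Geometry'
--         elif 'Transpose' in base:
--             cat = 'Transpose'
--         elif 'Integral' in base or 'SumWindow' in base:
--             cat = 'Integral'
--         elif 'Alpha' in base or 'Gamma' in base or 'SwapChannels' in base:
--             cat = 'Color'
--         elif 'Mean' in base or 'StdDev' in base:
--             cat = 'Statistics'
--         elif 'Threshold' in base:
--             cat = 'Threshold'
--         elif 'AndC' in base or 'XorC' in base or 'LShiftC' in base or 'RShiftC' in base:
--             cat = 'Logical'
--         elif 'Magnitude' in base:
--             cat = 'Arithmetic'
--         elif 'Graphcut' in base:
--             cat = 'Segmentation'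
--         elif 'St' in base or 'ncv' in base:
--             cat = 'Legacy'
--         else:
--             cat = 'Other'
--
--         categories[cat].append(api)
--
--     return categories
-- ===== SOURCE B (Python) =====
-- from collections import defaultdict
--
-- # Flat priority list: the first substring (in order) found in the
-- # _Ctx-stripped name decides the category; a category's substrings are
-- # contiguous, so first-substring-match == first-category-with-any-match.
-- _SUB2CAT = [
--     ('Histogram', 'Histogram'),
--     ('Filter', 'Filtering'), ('Erode', 'Filtering'), ('Dilate', 'Filtering'),
--     ('Warp', 'Geometry'), ('Resize', 'Geometry'), ('Remap', 'Geometry'), ('Rotate', 'Geometry'),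
--     ('Transpose', 'Transpose'),
--     ('Integral', 'Integral'), ('SumWindow', 'Integral'),
--     ('Alpha', 'Color'), ('Gamma', 'Color'), ('SwapChannels', 'Color'),
--     ('Mean', 'Statistics'), ('StdDev', 'Statistics'),
--     ('Threshold', 'Threshold'),
--     ('AndC', 'Logical'), ('XorC', 'Logical'), ('LShiftC', 'Logical'), ('RShiftC', 'Logical'),
--     ('Magnitude', 'Arithmetic'),
--     ('Graphcut', 'Segmentation'),
--     ('St', 'Legacy'), ('ncv', 'Legacy'),
-- ]
--
-- def _label(base):
--     for sub, cat in _SUB2CAT: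
--         if sub in base:
--             return cat
--     return 'Other'
--
-- def categorize_apis(apis):
--     """Categorize APIs by function group"""
--     labels = [_label(api.replace('_Ctx', '')) for api in apis]
--     categories = defaultdict(list)
--     for cat in dict.fromkeys(labels):
--         categories[cat] = [api for api, c in zip(apis, labels) if c == cat]
--     return categories
-- ===== Notes on version B (the rewrite author's own statement) =====
-- stated objective: alternative
-- what changed: A's single pass that mutates a dict per item through a 13-branch if/elif chain becomes staged passes: a recursive first-match scan over one flat (substring, category) priority list labels every name, then the distinct labels are collected in order (dict.fromkeys) and each group is gathered by filtering the zipped (api, label) list.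
import Mathlib
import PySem

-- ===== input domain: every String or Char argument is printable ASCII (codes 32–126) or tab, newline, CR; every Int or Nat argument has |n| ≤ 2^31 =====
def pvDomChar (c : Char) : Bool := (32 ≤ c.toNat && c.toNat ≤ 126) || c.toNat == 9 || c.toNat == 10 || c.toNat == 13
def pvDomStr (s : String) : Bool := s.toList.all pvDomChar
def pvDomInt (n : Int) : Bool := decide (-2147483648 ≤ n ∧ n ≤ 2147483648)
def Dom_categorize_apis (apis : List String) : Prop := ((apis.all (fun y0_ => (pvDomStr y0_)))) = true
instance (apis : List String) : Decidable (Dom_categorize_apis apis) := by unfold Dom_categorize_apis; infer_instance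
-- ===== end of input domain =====

-- B is a different decomposition: a flat priority substring table scanned by a
-- recursive first-match labeller, then staged passes (label all, dedup labels,
-- gather each group by filtering) instead of A's single-pass dict accumulation.

-- ===== PORT A =====
-- the if/elif chain of A, on the _Ctx-stripped name
def pvCatA (base : String) : String :=
  if PySem.Str.isIn "Histogram" base then "Histogram"
  else if PySem.Str.isIn "Filter" base || PySem.Str.isIn "Erode" base || PySem.Str.isIn "Dilate" base then "Filtering"
  else if PySem.Str.isIn "Warp" base || PySem.Str.isIn "Resize" base || PySem.Str.isIn "Remap" base || PySem.Str.isIn "Rotate" base then "Geometry"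
  else if PySem.Str.isIn "Transpose" base then "Transpose"
  else if PySem.Str.isIn "Integral" base || PySem.Str.isIn "SumWindow" base then "Integral"
  else if PySem.Str.isIn "Alpha" base || PySem.Str.isIn "Gamma" base || PySem.Str.isIn "SwapChannels" base then "Color"
  else if PySem.Str.isIn "Mean" base || PySem.Str.isIn "StdDev" base then "Statistics"
  else if PySem.Str.isIn "Threshold" base then "Threshold"
  else if PySem.Str.isIn "AndC" base || PySem.Str.isIn "XorC" base || PySem.Str.isIn "LShiftC" base || PySem.Str.isIn "RShiftC" base then "Logical"
  else if PySem.Str.isIn "Magnitude" base then "Arithmetic"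
  else if PySem.Str.isIn "Graphcut" base then "Segmentation"
  else if PySem.Str.isIn "St" base || PySem.Str.isIn "ncv" base then "Legacy"
  else "Other"

def categorize_apis (apis : List String) : List (String × List String) :=
  (apis.foldl (fun (d : PySem.Dict String (List String)) api =>
      let base := PySem.Str.replace api "_Ctx" ""
      let cat := pvCatA base
      d.modify cat [] (· ++ [api]))       -- categories[cat].append(api) on a defaultdict(list)
    PySem.Dict.empty).items

-- ===== PORT B =====
def pvSub2Cat : List (String × String) :=
  [("Histogram", "Histogram"),
   ("Filter", "Filtering"),
   ("Erode", "Filtering"),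
   ("Dilate", "Filtering"),
   ("Warp", "Geometry"),
   ("Resize", "Geometry"),
   ("Remap", "Geometry"),
   ("Rotate", "Geometry"),
   ("Transpose", "Transpose"),
   ("Integral", "Integral"),
   ("SumWindow", "Integral"),
   ("Alpha", "Color"),
   ("Gamma", "Color"),
   ("SwapChannels", "Color"),
   ("Mean", "Statistics"),
   ("StdDev", "Statistics"),
   ("Threshold", "Threshold"),
   ("AndC", "Logical"),
   ("XorC", "Logical"),
   ("LShiftC", "Logical"),
   ("RShiftC", "Logical"),
   ("Magnitude", "Arithmetic"),
   ("Graphcut", "Segmentation"),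
   ("St", "Legacy"),
   ("ncv", "Legacy")]

-- the 'for sub, cat in _SUB2CAT: if sub in base: return cat' loop
def pvLabel : List (String × String) → String → String
  | [], _ => "Other"
  | (sub, cat) :: rest, base => if PySem.Str.isIn sub base then cat else pvLabel rest base

def categorize_apis_alt (apis : List String) : List (String × List String) :=
  let labels := apis.map (fun api => pvLabel pvSub2Cat (PySem.Str.replace api "_Ctx" ""))
  ((PySem.List.dedup labels).foldl           -- dict.fromkeys(labels)
     (fun (d : PySem.Dict String (List String)) cat =>
        d.insert cat (((apis.zip labels).filter (fun p => p.2 == cat)).map (·.1)))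
     PySem.Dict.empty).items

-- ===== PRECONDITION & SPEC =====
def Spec_categorize_apis (apis : List String) (out : List (String × List String)) : Prop := out = categorize_apis_alt apis
instance (apis : List String) (out : List (String × List String)) : Decidable (Spec_categorize_apis apis out) := by unfold Spec_categorize_apis; infer_instance

-- ===== CLAIM =====
def Claim_equal_categorize_apis : Prop := ∀ (apis : List String), Dom_categorize_apis apis → Spec_categorize_apis apis (categorize_apis apis)

-- ===== LEMMAS AND PROOFS =====

-- the flat first-match scan computes exactly A's if/elif chain
theorem pvLabel_eq (base : String) : pvLabel pvSub2Cat base = pvCatA base := by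
  simp only [pvSub2Cat, pvLabel, pvCatA]
  cases PySem.Str.isIn "Histogram" base
  case true => simp
  case false =>
    cases PySem.Str.isIn "Filter" base
    case true => simp
    case false =>
      cases PySem.Str.isIn "Erode" base
      case true => simp
      case false =>
        cases PySem.Str.isIn "Dilate" base
        case true => simp
        case false =>
          cases PySem.Str.isIn "Warp" base
          case true => simp
          case false =>
            cases PySem.Str.isIn "Resize" base
            case true => simp
            case false =>
              cases PySem.Str.isIn "Remap" base
              case true => simp
              case false =>
                cases PySem.Str.isIn "Rotate" base
                case true => simp
                case false =>
                  cases PySem.Str.isIn "Transpose" base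
                  case true => simp
                  case false =>
                    cases PySem.Str.isIn "Integral" base
                    case true => simp
                    case false =>
                      cases PySem.Str.isIn "SumWindow" base
                      case true => simp
                      case false =>
                        cases PySem.Str.isIn "Alpha" base
                        case true => simp
                        case false =>
                          cases PySem.Str.isIn "Gamma" base
                          case true => simp
                          case false =>
                            cases PySem.Str.isIn "SwapChannels" base
                            case true => simp
                            case false =>
                              cases PySem.Str.isIn "Mean" base
                              case true => simp
                              case false =>
                                cases PySem.Str.isIn "StdDev" base
                                case true => simp
                                case false =>
                                  cases PySem.Str.isIn "Threshold" base
                                  case true => simp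
                                  case false =>
                                    cases PySem.Str.isIn "AndC" base
                                    case true => simp
                                    case false =>
                                      cases PySem.Str.isIn "XorC" base
                                      case true => simp
                                      case false =>
                                        cases PySem.Str.isIn "LShiftC" base
                                        case true => simp
                                        case false =>
                                          cases PySem.Str.isIn "RShiftC" base
                                          case true => simp
                                          case false =>
                                            cases PySem.Str.isIn "Magnitude" base
                                            case true => simp
                                            case false =>
                                              cases PySem.Str.isIn "Graphcut" base
                                              case true => simp
                                              case false =>
                                                cases PySem.Str.isIn "St" base
                                                case true => simp
                                                case false =>
                                                  cases PySem.Str.isIn "ncv" base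
                                                  case true => simp
                                                  case false =>
                                                    simp

-- gathering group 'cat' from (label, api) pairs = gathering it from zip(apis, labels)
theorem pvFilter_eq (c : String → String) (cat : String) (apis : List String) :
    ((apis.map (fun a => (c a, a))).filter (fun p => p.1 == cat)).map (·.2)
      = ((apis.zip (apis.map c)).filter (fun p => p.2 == cat)).map (·.1) := by
  induction apis with
  | nil => rfl
  | cons a t ih =>
    by_cases h : c a = cat <;>
      simp [h, ih]

theorem categorize_apis_spec : Claim_equal_categorize_apis := by
  intro apis _
  unfold Spec_categorize_apis categorize_apis categorize_apis_alt
  simp only [pvLabel_eq]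
  set c : String → String := fun api => pvCatA (PySem.Str.replace api "_Ctx" "") with hc
  -- A's fold over apis is a fold over the (category, api) pairs
  have hA : (apis.foldl (fun (d : PySem.Dict String (List String)) api =>
        d.modify (c api) [] (· ++ [api])) PySem.Dict.empty)
      = ((apis.map (fun a => (c a, a))).foldl
          (fun (d : PySem.Dict String (List String)) p => d.modify p.1 [] (· ++ [p.2]))
          PySem.Dict.empty) := by
    rw [List.foldl_map]
  rw [hA]
  set l := apis.map (fun a => (c a, a)) with hl
  have hnd : ((l.foldl (fun (d : PySem.Dict String (List String)) p =>
      d.modify p.1 [] (· ++ [p.2])) PySem.Dict.empty).keys).Nodup :=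
    PySem.Dict.nodup_keys_foldl_modify_key l Prod.fst [] (fun d p => (· ++ [p.2])) _
      PySem.Dict.nodup_keys_empty
  rw [PySem.Dict.items_eq_map_keys _ hnd []]
  have hkeys : (l.foldl (fun (d : PySem.Dict String (List String)) p =>
      d.modify p.1 [] (· ++ [p.2])) PySem.Dict.empty).keys
      = PySem.Set.ofList (apis.map c) := by
    rw [PySem.Dict.keys_foldl_modify_key l Prod.fst [] (fun d p => (· ++ [p.2]))]
    simp [PySem.Set.update_nil_left, hl, List.map_map, Function.comp_def]
  rw [hkeys]
  -- B's fold inserts fresh distinct keys, so its items are just the mapped list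
  rw [PySem.List.dedup_eq_ofList]
  have hB := PySem.Dict.items_foldl_insert_fresh (PySem.Set.ofList (apis.map c))
      (fun cat => cat)
      (fun cat => ((apis.zip (apis.map c)).filter (fun p => p.2 == cat)).map (·.1))
      PySem.Dict.empty
      (fun a _ => PySem.Dict.contains_empty a)
      (by simp [PySem.Set.nodup_ofList (apis.map c)])
  rw [hB]
  refine List.map_congr_left (fun cat _ => ?_)
  rw [PySem.Dict.getD_foldl_modify_append]
  simp [PySem.Dict.getD_empty, hl, pvFilter_eq c cat apis]
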